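-- pv_equiv track=rewrite | github.com/JBreitenbr/fCC-Daily-Coding-Challenge | 04-2026.py | capitalize_fibonacci
-- ===== SOURCE A (Python) =====
-- def fibo(n):
--     if n==1 or n==2:
--         return 1
--     else:
--         return fibo(n-1)+fibo(n-2)
--
-- def capitalize_fibonacci(s):
--     fibi=[0]
--     for i in range(1,16):
--         fibi.append(fibo(i))
--     res=""
--     for i in range(len(s)):
--         if i in fibi:
--             res+=s[i].upper()
--         else:
--             res+=s[i].lower()
--     return res
-- ===== SOURCE B (Python) =====
-- def capitalize_fibonacci(s):
--     chars = list(s.lower())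
--     a, b = 0, 1
--     for _ in range(16):  # same 16 indices A collects: 0,1,1,2,3,5,...,610
--         if a < len(chars):
--             chars[a] = s[a].upper()
--         a, b = b, a + b
--     return ''.join(chars)
-- ===== Notes on version B (the rewrite author's own statement) =====
-- stated objective: faster
-- what changed: Instead of testing every index for membership in a 16-element Fibonacci list built by exponential recursive fibo, B lowercases the whole string once and scatters uppercase characters onto the 16 Fibonacci indices generated iteratively.
import Mathlib
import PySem

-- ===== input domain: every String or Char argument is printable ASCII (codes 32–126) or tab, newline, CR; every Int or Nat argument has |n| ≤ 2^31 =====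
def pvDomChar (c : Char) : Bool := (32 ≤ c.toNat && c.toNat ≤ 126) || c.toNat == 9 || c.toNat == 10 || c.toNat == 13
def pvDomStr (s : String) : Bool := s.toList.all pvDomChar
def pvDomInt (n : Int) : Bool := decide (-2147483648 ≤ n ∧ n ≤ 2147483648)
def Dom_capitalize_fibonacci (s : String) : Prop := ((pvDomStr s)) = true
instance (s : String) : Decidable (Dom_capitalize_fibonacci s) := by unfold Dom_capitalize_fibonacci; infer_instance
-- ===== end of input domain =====

-- B replaces A's per-index membership scan over the exponential-recursive Fibonacci list by one
-- lowercasing pass plus an iterative-Fibonacci scatter of 16 uppercase positions (objective: faster, constant factor).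

-- ===== PORT A =====
-- Python's fibo diverges for n <= 0 (never called there by capitalize_fibonacci); the 0 case is a totality guard.
def fibo : Nat → Nat
  | 0 => 0
  | 1 => 1
  | 2 => 1
  | n + 3 => fibo (n + 2) + fibo (n + 1)

def capitalize_fibonacci (s : String) : String :=
  let fibi : List Int := (PySem.List.pyRange 1 16 1).foldl (fun acc i => acc ++ [(fibo i.toNat : Int)]) [0]
  let res : List Char := (PySem.List.pyRange 0 (s.toList.length : Int) 1).foldl
      (fun res i =>
        if i ∈ fibi then res ++ [PySem.Chars.upperChar (PySem.List.pyGetD s.toList i ' ')]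
        else res ++ [PySem.Chars.lowerChar (PySem.List.pyGetD s.toList i ' ')]) []
  String.ofList res

-- ===== PORT B =====
def capitalize_fibonacci_alt (s : String) : String :=
  let st := (List.range 16).foldl
      (fun (st : List Char × Int × Int) _ =>
        let chars := st.1
        let a := st.2.1
        let b := st.2.2
        let chars := if a < (chars.length : Int) then
            chars.set a.toNat (PySem.Chars.upperChar (PySem.List.pyGetD s.toList a ' '))
          else chars
        (chars, b, a + b))
      (PySem.Chars.lower s.toList, 0, 1)
  String.ofList st.1

-- ===== PRECONDITION & SPEC =====
def Spec_capitalize_fibonacci (s : String) (out : String) : Prop := out = capitalize_fibonacci_alt s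
instance (s : String) (out : String) : Decidable (Spec_capitalize_fibonacci s out) := by unfold Spec_capitalize_fibonacci; infer_instance

-- ===== CLAIM (what is proved, stated in full; the proofs are below) =====
def Claim_equal_capitalize_fibonacci : Prop := ∀ (s : String), Dom_capitalize_fibonacci s → Spec_capitalize_fibonacci s (capitalize_fibonacci s)

-- ===== LEMMAS AND PROOFS =====

-- the 16 indices both programs uppercase
def pvFibIdx : List Int := [0, 1, 1, 2, 3, 5, 8, 13, 21, 34, 55, 89, 144, 233, 377, 610]

-- one scatter step of B (proof-side abbreviation of the loop body's chars update)
def pvStep (orig : List Char) (chars : List Char) (a : Int) : List Char :=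
  if a < (chars.length : Int) then
    chars.set a.toNat (PySem.Chars.upperChar (PySem.List.pyGetD orig a ' '))
  else chars

lemma pvFibi_eq :
    (PySem.List.pyRange 1 16 1).foldl (fun acc i => acc ++ [(fibo i.toNat : Int)]) [0] = pvFibIdx := by
  decide

lemma pvStep_length (orig chars : List Char) (a : Int) :
    (pvStep orig chars a).length = chars.length := by
  unfold pvStep; split <;> simp

lemma pvFold_length (orig : List Char) (L : List Int) (chars : List Char) :
    (L.foldl (pvStep orig) chars).length = chars.length := by
  induction L generalizing chars with
  | nil => rfl
  | cons a L ih => simp [List.foldl_cons, ih, pvStep_length]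

lemma pvStep_getElem? (orig chars : List Char) (a : Int) (ha : 0 ≤ a) (k : Nat) (hk : k < chars.length) :
    (pvStep orig chars a)[k]? =
      if (k : Int) = a then some (PySem.Chars.upperChar (PySem.List.pyGetD orig (k : Int) ' '))
      else chars[k]? := by
  unfold pvStep
  by_cases hka : (k : Int) = a
  · have : a.toNat = k := by omega
    subst this
    have : a < (chars.length : Int) := by omega
    simp [this, List.getElem?_set, hka]
    omega
  · split
    · rw [List.getElem?_set]
      have : ¬ a.toNat = k := by omega
      simp [this]
    · simp

lemma pvFold_getElem? (orig : List Char) (L : List Int) (hL : ∀ x ∈ L, 0 ≤ x)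
    (chars : List Char) (k : Nat) (hk : k < chars.length) :
    (L.foldl (pvStep orig) chars)[k]? =
      if (k : Int) ∈ L then some (PySem.Chars.upperChar (PySem.List.pyGetD orig (k : Int) ' '))
      else chars[k]? := by
  induction L generalizing chars with
  | nil => simp
  | cons a L ih =>
    have ha : 0 ≤ a := hL a (by simp)
    have hk' : k < (pvStep orig chars a).length := by rw [pvStep_length]; exact hk
    rw [List.foldl_cons, ih (fun x hx => hL x (by simp [hx])) _ hk',
        pvStep_getElem? orig chars a ha k hk]
    by_cases hka : (k : Int) = a
    · by_cases hm : (k : Int) ∈ L <;> simp [hka]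
    · by_cases hm : (k : Int) ∈ L <;> simp [hka, hm]

-- the sequence of `a` values B's loop visits, starting from the pair (a, b)
def pvFibSeq (a b : Int) : Nat → List Int
  | 0 => []
  | n + 1 => a :: pvFibSeq b (a + b) n

lemma pvLoop (orig : List Char) (l : List Nat) (chars : List Char) (a b : Int) :
    (l.foldl (fun (st : List Char × Int × Int) _ =>
        let chars := st.1
        let a := st.2.1
        let b := st.2.2
        let chars := if a < (chars.length : Int) then
            chars.set a.toNat (PySem.Chars.upperChar (PySem.List.pyGetD orig a ' '))
          else chars
        (chars, b, a + b)) (chars, a, b)).1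
      = (pvFibSeq a b l.length).foldl (pvStep orig) chars := by
  induction l generalizing chars a b with
  | nil => rfl
  | cons x l ih =>
    rw [List.foldl_cons, List.length_cons, pvFibSeq, List.foldl_cons]
    exact ih _ _ _

-- B's loop over range(16) is the scatter of pvFibIdx
lemma pvAlt_eq_fold (s : String) :
    (capitalize_fibonacci_alt s).toList = pvFibIdx.foldl (pvStep s.toList) (PySem.Chars.lower s.toList) := by
  show (String.ofList _).toList = _
  rw [String.toList_ofList, pvLoop, List.length_range,
      show pvFibSeq 0 1 16 = pvFibIdx from by decide]

-- A's loop is a map over the index range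
lemma pvA_eq_map (s : String) :
    (capitalize_fibonacci s).toList =
      (PySem.List.pyRange 0 (s.toList.length : Int) 1).map
        (fun i => if i ∈ pvFibIdx then PySem.Chars.upperChar (PySem.List.pyGetD s.toList i ' ')
                  else PySem.Chars.lowerChar (PySem.List.pyGetD s.toList i ' ')) := by
  show (String.ofList _).toList = _
  rw [String.toList_ofList, pvFibi_eq]
  have hfun : (fun (res : List Char) (i : Int) =>
      if i ∈ pvFibIdx then res ++ [PySem.Chars.upperChar (PySem.List.pyGetD s.toList i ' ')]
      else res ++ [PySem.Chars.lowerChar (PySem.List.pyGetD s.toList i ' ')]) =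
      (fun res i => res ++ [if i ∈ pvFibIdx then PySem.Chars.upperChar (PySem.List.pyGetD s.toList i ' ')
                            else PySem.Chars.lowerChar (PySem.List.pyGetD s.toList i ' ')]) := by
    funext res i; split <;> rfl
  rw [hfun, PySem.List.foldl_append_singleton_eq_map]
  simp

-- ===== VERDICT (by name: the statement is the Claim_ definition above) =====
theorem capitalize_fibonacci_spec : Claim_equal_capitalize_fibonacci := by
  intro s _
  show capitalize_fibonacci s = capitalize_fibonacci_alt s
  have h : (capitalize_fibonacci s).toList = (capitalize_fibonacci_alt s).toList := by
    rw [pvA_eq_map, pvAlt_eq_fold]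
    have hlow : PySem.Chars.lower s.toList = s.toList.map PySem.Chars.lowerChar := by
      simp [PySem.Chars.lower]
    apply List.ext_getElem?
    intro k
    by_cases hk : k < s.toList.length
    · rw [PySem.List.getElem?_map_pyRange_zero _ _ _ hk,
          pvFold_getElem? s.toList pvFibIdx (by decide) _ k
            (by rw [hlow, List.length_map]; exact hk)]
      have hget : PySem.List.pyGetD s.toList (k : Int) ' ' = s.toList[k] := by
        simp [PySem.List.pyGetD_natCast, List.getD_eq_getElem?_getD, List.getElem?_eq_getElem hk]
      by_cases hm : (k : Int) ∈ pvFibIdx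
      · simp [hm]
      · simp [hm, hlow, List.getElem?_map, List.getElem?_eq_getElem hk, hget]
    · rw [List.getElem?_eq_none, List.getElem?_eq_none]
      · rw [pvFold_length, hlow, List.length_map]; omega
      · rw [List.length_map, PySem.List.length_pyRange_one]; omega
  have h2 := congrArg String.ofList h
  simpa using h2
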